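-- pv_equiv track=rewrite | github.com/samuelmoyal/Tweets-Analysis-Portwiture | analysis/wcloud_about_user.py | frequence
-- ===== SOURCE A (Python) =====
-- def frequence(r):  # On détermine ensuite la fréquence des mots
--
--     d = {}
--     for w in r:
--         if w in d.keys() and w not in ["http", "rt"] and len(w) != 1:
--             d[w] += 1
--         else:
--             d[w] = 1
--
--     return d
-- ===== SOURCE B (Python) =====
-- def frequence(r):
--     counts = {}
--     for w in r:
--         counts[w] = counts.get(w, 0) + 1
--     return {w: (n if n > 1 and w not in ("http", "rt") and len(w) != 1 else 1)
--             for w, n in counts.items()}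
-- ===== Notes on version B (the rewrite author's own statement) =====
-- stated objective: alternative
-- what changed: Replaces A's single loop with conditional reset-to-1 logic by a plain counting pass followed by a second pass that caps http/rt/single-character words (and count-1 words) at 1.
import Mathlib
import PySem

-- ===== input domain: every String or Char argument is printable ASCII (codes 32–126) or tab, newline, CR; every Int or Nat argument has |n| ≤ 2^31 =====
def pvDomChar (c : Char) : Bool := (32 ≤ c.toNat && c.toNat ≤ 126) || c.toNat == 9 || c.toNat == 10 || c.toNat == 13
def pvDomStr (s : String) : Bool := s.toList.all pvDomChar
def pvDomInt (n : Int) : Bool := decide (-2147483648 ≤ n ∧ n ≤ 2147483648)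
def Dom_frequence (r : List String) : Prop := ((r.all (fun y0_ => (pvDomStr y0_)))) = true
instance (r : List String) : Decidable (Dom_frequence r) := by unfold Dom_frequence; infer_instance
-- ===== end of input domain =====

-- B replaces A's single loop with reset-to-1 special cases by a counting pass plus a transforming second pass (alternative decomposition, same cost).

-- ===== PORT A =====
-- literal port of A: one loop; increment only if the word is already present, is not "http"/"rt", and has length ≠ 1; otherwise (re)set to 1
def frequence (r : List String) : List (String × Int) :=
  (r.foldl
    (fun d w =>
      if d.contains w && !(["http", "rt"].contains w) && PySem.Str.len w != 1 then
        d.insert w (d.getD w 0 + 1)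
      else
        d.insert w 1)
    PySem.Dict.empty).items

-- ===== PORT B =====
-- literal port of Source B: counting loop (counts[w] = counts.get(w,0)+1), then a dict comprehension over counts.items()
def frequence_alt (r : List String) : List (String × Int) :=
  ((r.foldl (fun d w => d.insert w (d.getD w 0 + 1)) PySem.Dict.empty).items).map
    (fun p => (p.1, if p.2 > 1 && !(["http", "rt"].contains p.1) && PySem.Str.len p.1 != 1 then p.2 else 1))

-- ===== PRECONDITION & SPEC =====
def Spec_frequence (r : List String) (out : List (String × Int)) : Prop := out = frequence_alt r
instance (r : List String) (out : List (String × Int)) : Decidable (Spec_frequence r out) := by unfold Spec_frequence; infer_instance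

-- ===== CLAIM (what is proved, stated in full; the proofs are below) =====
def Claim_equal_frequence : Prop := ∀ (r : List String), Dom_frequence r → Spec_frequence r (frequence r)

-- ===== LEMMAS AND PROOFS =====

-- the transform B applies to a counted item
def pvF (p : String × Int) : String × Int :=
  (p.1, if p.2 > 1 && !(["http", "rt"].contains p.1) && PySem.Str.len p.1 != 1 then p.2 else 1)

theorem pvF_fst (p : String × Int) : (pvF p).1 = p.1 := rfl

theorem pv_keys_mk (c : PySem.Dict String Int) :
    (PySem.Dict.mk (c.items.map pvF)).keys = c.keys := by
  simp only [PySem.Dict.keys_mk, List.map_map]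
  rfl

theorem pv_contains_mk (c : PySem.Dict String Int) (w : String) :
    (PySem.Dict.mk (c.items.map pvF)).contains w = c.contains w := by
  rw [Bool.eq_iff_iff, PySem.Dict.contains_iff_mem_keys, PySem.Dict.contains_iff_mem_keys,
    pv_keys_mk]

-- A's loop body, applied to the transformed dict, equals transforming the counting loop's body
theorem pv_step (c : PySem.Dict String Int) (hnd : c.keys.Nodup)
    (hpos : ∀ p ∈ c.items, 1 ≤ p.2) (w : String) :
    (if (PySem.Dict.mk (c.items.map pvF)).contains w && !(["http", "rt"].contains w)
        && PySem.Str.len w != 1 then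
      (PySem.Dict.mk (c.items.map pvF)).insert w
        ((PySem.Dict.mk (c.items.map pvF)).getD w 0 + 1)
    else
      (PySem.Dict.mk (c.items.map pvF)).insert w 1)
    = PySem.Dict.mk ((c.insert w (c.getD w 0 + 1)).items.map pvF) := by
  have hndA : (PySem.Dict.mk (c.items.map pvF)).keys.Nodup := (pv_keys_mk c) ▸ hnd
  by_cases hc : c.contains w = true
  · -- w already counted: get its current count v ≥ 1
    have hsome : (c.get? w).isSome := by rw [← PySem.Dict.contains_eq_isSome_get?]; exact hc
    obtain ⟨v, hv⟩ := Option.isSome_iff_exists.mp hsome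
    have hmem : (w, v) ∈ c.items := PySem.Dict.mem_items_of_get?_eq_some c hv
    have hv1 : 1 ≤ v := hpos _ hmem
    have hgD : c.getD w 0 = v := PySem.Dict.getD_of_mem_items c hmem hnd 0
    have hcA : (PySem.Dict.mk (c.items.map pvF)).contains w = true := by
      rw [pv_contains_mk]; exact hc
    have hmemA : (w, (pvF (w, v)).2) ∈ (PySem.Dict.mk (c.items.map pvF)).items := by
      have : pvF (w, v) ∈ c.items.map pvF := List.mem_map_of_mem hmem
      simpa using this
    have hgDA : (PySem.Dict.mk (c.items.map pvF)).getD w 0 = (pvF (w, v)).2 :=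
      PySem.Dict.getD_of_mem_items _ hmemA hndA 0
    -- any item of c keyed by w carries the value v
    have hval : ∀ p ∈ c.items, p.1 = w → p.2 = v := by
      intro p hp h1
      have hmem2 : (w, p.2) ∈ c.items := by rwa [← h1, Prod.mk.eta]
      have := PySem.Dict.getD_of_mem_items c hmem2 hnd 0
      omega
    by_cases hg : (!(["http", "rt"].contains w) && PySem.Str.len w != 1) = true
    · -- ordinary repeated word: both sides carry the incremented count
      obtain ⟨hA, hB⟩ := Bool.and_eq_true_iff.mp hg
      rw [if_pos (by rw [Bool.and_assoc, hcA, Bool.true_and, hg])]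
      apply PySem.Dict.ext
      rw [PySem.Dict.items_insert_of_contains _ _ hcA,
        PySem.Dict.items_insert_of_contains _ _ hc]
      simp only [List.map_map]
      apply List.map_congr_left
      intro p hp
      simp only [Function.comp_apply, pvF_fst]
      by_cases h1 : p.1 = w
      · rw [if_pos (by simp [h1]), if_pos (by simp [h1]), hgDA, hgD]
        simp only [pvF, hA, hB, Bool.and_true]
        have hy : v + 1 > 1 := by omega
        by_cases hv2 : v > 1 <;> simp [hv2, hy] <;> omega
      · rw [if_neg (by simp [h1]), if_neg (by simp [h1])]
    · -- "http"/"rt"/one-character word: A resets to 1, B caps at 1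
      have hgf : (!(["http", "rt"].contains w) && PySem.Str.len w != 1) = false := by
        simpa using hg
      rw [if_neg (by rw [Bool.and_assoc, hgf, Bool.and_false]; simp)]
      apply PySem.Dict.ext
      rw [PySem.Dict.items_insert_of_contains _ _ hcA,
        PySem.Dict.items_insert_of_contains _ _ hc]
      simp only [List.map_map]
      apply List.map_congr_left
      intro p hp
      simp only [Function.comp_apply, pvF_fst]
      by_cases h1 : p.1 = w
      · rw [if_pos (by simp [h1]), if_pos (by simp [h1])]
        show (w, 1) = pvF (w, c.getD w 0 + 1)
        simp only [pvF]
        rw [Bool.and_assoc, hgf, Bool.and_false]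
        rfl
      · rw [if_neg (by simp [h1]), if_neg (by simp [h1])]
  · -- fresh word: both sides append (w, 1)
    have hc' : c.contains w = false := by simpa using hc
    have hcA : (PySem.Dict.mk (c.items.map pvF)).contains w = false := by
      rw [pv_contains_mk]; exact hc'
    rw [if_neg (by rw [hcA]; simp)]
    apply PySem.Dict.ext
    rw [PySem.Dict.items_insert_of_not_contains _ _ hcA,
      PySem.Dict.items_insert_of_not_contains _ _ hc',
      PySem.Dict.getD_of_not_contains _ _ hc']
    simp [pvF]

-- loop invariant: A's fold over the transformed dict is the transform of the counting fold
theorem pv_key (l : List String) (c : PySem.Dict String Int)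
    (hnd : c.keys.Nodup) (hpos : ∀ p ∈ c.items, 1 ≤ p.2) :
    (l.foldl
      (fun d w =>
        if d.contains w && !(["http", "rt"].contains w) && PySem.Str.len w != 1 then
          d.insert w (d.getD w 0 + 1)
        else
          d.insert w 1)
      (PySem.Dict.mk (c.items.map pvF))).items
    = ((l.foldl (fun d w => d.insert w (d.getD w 0 + 1)) c).items).map pvF := by
  induction l generalizing c with
  | nil => simp
  | cons w l ih =>
    simp only [List.foldl_cons]
    rw [pv_step c hnd hpos w]
    refine ih (c.insert w (c.getD w 0 + 1)) (PySem.Dict.nodup_keys_insert c w _ hnd) ?_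
    intro p hp
    rcases (PySem.Dict.mem_items_insert c w _ p).mp hp with h | ⟨h, _⟩
    · subst h
      show (1 : Int) ≤ c.getD w 0 + 1
      by_cases hc : c.contains w = true
      · have hsome : (c.get? w).isSome := by rw [← PySem.Dict.contains_eq_isSome_get?]; exact hc
        obtain ⟨v, hv⟩ := Option.isSome_iff_exists.mp hsome
        have hmem : (w, v) ∈ c.items := PySem.Dict.mem_items_of_get?_eq_some c hv
        have := hpos _ hmem
        have hgD : c.getD w 0 = v := PySem.Dict.getD_of_mem_items c hmem hnd 0
        omega
      · have hc' : c.contains w = false := by simpa using hc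
        rw [PySem.Dict.getD_of_not_contains _ _ hc']
        norm_num
    · exact hpos _ h

-- ===== VERDICT (by name: the statement is the Claim_ definition above) =====
theorem frequence_spec : Claim_equal_frequence := by
  intro r _
  unfold Spec_frequence frequence frequence_alt
  have h := pv_key r PySem.Dict.empty
    (by simp [PySem.Dict.keys, PySem.Dict.empty])
    (by simp [PySem.Dict.empty])
  unfold pvF at h
  simpa [PySem.Dict.empty] using h
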